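-- pv_equiv track=rewrite | github.com/taylor-swift-13/source2fsm | src/modifyDot.py | undepulicate_label
-- ===== SOURCE A (Python) =====
-- def undepulicate_label(label):
--     segments = label.split(')')
--     processed_segments = [segment.strip() for segment in segments]
--     label = ')'.join(processed_segments)
--
--     segments = label.split(';')
--     processed_segments = [segment.strip() for segment in segments]
--     label = ';'.join(processed_segments)
--
--     return label
-- ===== SOURCE B (Python) =====
-- def undepulicate_label(label):
--     out = []
--     buf = []
--     last_delim = False
--     for c in label:
--         if c.isspace():
--             buf.append(c)
--         else:
--             if not (last_delim or not out or c in ');'):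
--                 out += buf
--             buf = []
--             out.append(c)
--             last_delim = c in ');'
--     return ''.join(out)
-- ===== Notes on version B (the rewrite author's own statement) =====
-- stated objective: alternative
-- what changed: Replaces A's two split/strip/join passes (one per delimiter character) by a single left-to-right character scan that buffers each whitespace run and drops it exactly when it touches a delimiter or a string boundary, keeping it otherwise; no intermediate segment lists or intermediate string are built.
import Mathlib
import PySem

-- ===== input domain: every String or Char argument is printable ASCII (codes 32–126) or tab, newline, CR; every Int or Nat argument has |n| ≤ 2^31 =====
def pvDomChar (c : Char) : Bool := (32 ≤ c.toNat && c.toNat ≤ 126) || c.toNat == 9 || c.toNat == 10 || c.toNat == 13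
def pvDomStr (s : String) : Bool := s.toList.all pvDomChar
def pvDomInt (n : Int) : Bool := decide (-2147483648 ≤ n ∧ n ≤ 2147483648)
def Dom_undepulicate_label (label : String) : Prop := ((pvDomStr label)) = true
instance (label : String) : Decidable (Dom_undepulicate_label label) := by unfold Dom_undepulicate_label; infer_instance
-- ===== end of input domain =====

-- B replaces A's two split/strip/join passes by one left-to-right scan with a buffered whitespace run (objective: alternative single-pass algorithm, same result).

-- ===== PORT A =====
-- label.split(')') with the non-empty literal separator is PySem.Chars.splitOn on code points.
def undepulicate_label (label : String) : String :=
  let segments := PySem.Chars.splitOn label.toList [')']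
  let processed_segments := segments.map PySem.Chars.strip
  let label1 := PySem.Chars.join [')'] processed_segments
  let segments2 := PySem.Chars.splitOn label1 [';']
  let processed_segments2 := segments2.map PySem.Chars.strip
  String.ofList (PySem.Chars.join [';'] processed_segments2)

-- ===== PORT B =====
-- one pass: buffer whitespace runs; drop the buffer at the start, next to a ')'/';' delimiter, and at the end.
-- `c in ');'` for a single char c is exactly c == ')' || c == ';'.
def undepulicate_label_alt (label : String) : String :=
  let step : (List Char × List Char × Bool) → Char → (List Char × List Char × Bool) :=
    fun st c =>
      let out := st.1
      let buf := st.2.1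
      let lastDelim := st.2.2
      if PySem.Chars.isspace c then (out, buf ++ [c], lastDelim)
      else
        let isDelim := c == ')' || c == ';'
        let out' := if lastDelim || out.isEmpty || isDelim then out else out ++ buf
        (out' ++ [c], [], isDelim)
  String.ofList (label.toList.foldl step ([], [], false)).1

-- ===== PRECONDITION & SPEC =====
def Spec_undepulicate_label (label : String) (out : String) : Prop := out = undepulicate_label_alt label
instance (label : String) (out : String) : Decidable (Spec_undepulicate_label label out) := by unfold Spec_undepulicate_label; infer_instance

-- ===== CLAIM (what is proved, stated in full; the proofs are below) =====
def Claim_equal_undepulicate_label : Prop := ∀ (label : String), Dom_undepulicate_label label → Spec_undepulicate_label label (undepulicate_label label)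

-- ===== LEMMAS AND PROOFS =====

-- the single-pass transducer, abstracted over the delimiter predicate p:
-- state = (pending "strip leading whitespace" flag m, buffered whitespace run buf)
def pvF (p : Char → Bool) : Bool → List Char → List Char → List Char
  | _, _, [] => []
  | m, buf, c :: cs =>
    if PySem.Chars.isspace c then pvF p m (buf ++ [c]) cs
    else if p c then c :: pvF p true [] cs
    else (if m then [] else buf) ++ c :: pvF p false [] cs

-- structural split on one delimiter char
def pvSplit (d : Char) : List Char → List (List Char)
  | [] => [[]]
  | c :: cs => if c = d then [] :: pvSplit d cs else (pvSplit d cs).modifyHead (c :: ·)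

-- one split/strip/join pass in which the leading whitespace of the FIRST segment is kept
def pvQ (d : Char) (s : List Char) : List Char :=
  match pvSplit d s with
  | [] => []
  | h :: t => PySem.Chars.join [d] (PySem.Chars.rstrip h :: t.map PySem.Chars.strip)

theorem pvSplit_ne_nil (d : Char) (s : List Char) : pvSplit d s ≠ [] := by
  induction s with
  | nil => simp [pvSplit]
  | cons c cs ih =>
    simp only [pvSplit]
    split
    · simp
    · cases h : pvSplit d cs with
      | nil => exact absurd h ih
      | cons a t => simp

theorem pv_go_spec (d : Char) (fuel : Nat) (l cur : List Char) (acc : List (List Char))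
    (h : l.length < fuel) :
    PySem.Chars.splitOn.go [d] fuel l cur acc =
      acc.reverse ++ (pvSplit d l).modifyHead (cur.reverse ++ ·) := by
  induction fuel generalizing l cur acc with
  | zero => omega
  | succ n ih =>
    cases l with
    | nil =>
      simp [PySem.Chars.splitOn.go, pvSplit]
    | cons c rest =>
      rw [PySem.Chars.splitOn.go]
      by_cases hcd : c = d
      · subst hcd
        rw [if_pos (by simp [List.isPrefixOf])]
        simp only [List.length_cons, List.length_nil, Nat.zero_add, List.drop_succ_cons, List.drop_zero]
        rw [ih rest [] (cur.reverse :: acc) (by simpa using Nat.lt_of_succ_lt_succ h)]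
        simp only [pvSplit, if_pos rfl]
        cases hs : pvSplit c rest <;> simp
      · rw [if_neg (by simp [List.isPrefixOf]; exact fun hh => hcd hh.symm)]
        rw [ih rest (c :: cur) acc (by simpa using Nat.lt_of_succ_lt_succ h)]
        simp only [pvSplit, if_neg hcd]
        cases hs : pvSplit d rest <;> simp

theorem pv_splitOn_eq (d : Char) (s : List Char) :
    PySem.Chars.splitOn s [d] = pvSplit d s := by
  rw [PySem.Chars.splitOn, pv_go_spec d _ s [] [] (by omega)]
  cases hs : pvSplit d s <;> simp

theorem pvSplit_append (d : Char) (pre : List Char) (l : List Char) (h : ∀ c ∈ pre, c ≠ d) :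
    pvSplit d (pre ++ l) = (pvSplit d l).modifyHead (pre ++ ·) := by
  induction pre with
  | nil =>
    simp only [List.nil_append]
    cases pvSplit d l <;> simp
  | cons c cs ih =>
    simp only [List.cons_append, pvSplit]
    rw [if_neg (h c (by simp)), ih (fun x hx => h x (by simp [hx]))]
    cases pvSplit d l <;> simp

theorem pvSplit_no_delim (d : Char) (l : List Char) (h : ∀ c ∈ l, c ≠ d) :
    pvSplit d l = [l] := by
  induction l with
  | nil => rfl
  | cons c cs ih =>
    simp only [pvSplit]
    rw [if_neg (h c (by simp))]
    rw [ih (fun x hx => h x (by simp [hx]))]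
    simp

theorem pv_lstrip_ws_append (buf s : List Char) (h : ∀ c ∈ buf, PySem.Chars.isspace c = true) :
    PySem.Chars.lstrip (buf ++ s) = PySem.Chars.lstrip s := by
  induction buf with
  | nil => simp
  | cons c cs ih =>
    simp only [List.cons_append, PySem.Chars.lstrip, List.dropWhile_cons] at *
    rw [h c (by simp)]
    exact ih (fun x hx => h x (by simp [hx]))

theorem pv_rstrip_ws (buf : List Char) (h : ∀ c ∈ buf, PySem.Chars.isspace c = true) :
    PySem.Chars.rstrip buf = [] := by
  simp [PySem.Chars.rstrip, List.dropWhile_eq_nil_iff]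
  intro x hx; exact h x (by simpa using hx)

theorem pv_rstrip_append_cons (pre t : List Char) (c : Char) (hc : PySem.Chars.isspace c = false) :
    PySem.Chars.rstrip (pre ++ c :: t) = pre ++ c :: PySem.Chars.rstrip t := by
  have h1 : (pre ++ c :: t).reverse = t.reverse ++ (c :: pre.reverse) := by simp
  simp only [PySem.Chars.rstrip, h1, List.dropWhile_append]
  split
  · next hall =>
    have hnil : t.reverse.dropWhile PySem.Chars.isspace = [] := List.isEmpty_iff.mp hall
    simp [hc, hnil]
  · simp [hc]

theorem pv_strip_ws_append_cons (buf t : List Char) (c : Char)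
    (hb : ∀ x ∈ buf, PySem.Chars.isspace x = true) (hc : PySem.Chars.isspace c = false) :
    PySem.Chars.strip (buf ++ c :: t) = c :: PySem.Chars.rstrip t := by
  rw [PySem.Chars.strip, pv_lstrip_ws_append buf _ hb]
  have : PySem.Chars.lstrip (c :: t) = c :: t := by
    simp [PySem.Chars.lstrip, List.dropWhile_cons, hc]
  rw [this]
  exact pv_rstrip_append_cons [] t c hc

theorem pv_join_head (sep a x : List Char) (ts : List (List Char)) :
    PySem.Chars.join sep ((a ++ x) :: ts) = a ++ PySem.Chars.join sep (x :: ts) := by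
  cases ts with
  | nil => simp [PySem.Chars.join_singleton]
  | cons y r => simp [PySem.Chars.join_cons_cons]

theorem pvF_cons (p : Char → Bool) (m : Bool) (buf : List Char) (c : Char) (cs : List Char) :
    pvF p m buf (c :: cs) =
      if PySem.Chars.isspace c then pvF p m (buf ++ [c]) cs
      else if p c then c :: pvF p true [] cs
      else (if m then [] else buf) ++ c :: pvF p false [] cs := by
  rw [pvF]


theorem pv_onepass (d : Char) (hd : PySem.Chars.isspace d = false) (s : List Char) :
    ∀ buf, (∀ c ∈ buf, PySem.Chars.isspace c = true) →
      PySem.Chars.join [d] ((pvSplit d (buf ++ s)).map PySem.Chars.strip) = pvF (· == d) true buf s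
      ∧ pvQ d (buf ++ s) = pvF (· == d) false buf s := by
  have hne : ∀ c, PySem.Chars.isspace c = true → c ≠ d := by
    intro c hc he; rw [he, hd] at hc; exact Bool.false_ne_true hc
  induction s with
  | nil =>
    intro buf hb
    have hsp : pvSplit d (buf ++ []) = [buf] := by
      rw [List.append_nil]; exact pvSplit_no_delim d buf (fun c hc => hne c (hb c hc))
    constructor
    · rw [hsp]
      simp only [List.map_cons, List.map_nil, PySem.Chars.join_singleton]
      rw [PySem.Chars.strip, show PySem.Chars.lstrip buf = PySem.Chars.lstrip [] from by
        simpa using pv_lstrip_ws_append buf [] hb]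
      simp [PySem.Chars.lstrip, PySem.Chars.rstrip, pvF]
    · rw [pvQ, hsp]
      simp only [List.map_nil, PySem.Chars.join_singleton]
      rw [pv_rstrip_ws buf hb]
      simp [pvF]
  | cons c cs ih =>
    intro buf hb
    by_cases hws : PySem.Chars.isspace c = true
    · have hb' : ∀ x ∈ buf ++ [c], PySem.Chars.isspace x = true := by
        intro x hx
        rcases List.mem_append.mp hx with h1 | h1
        · exact hb x h1
        · simp at h1; subst h1; exact hws
      have := ih (buf ++ [c]) hb'
      constructor
      · rw [show buf ++ c :: cs = (buf ++ [c]) ++ cs by simp, pvF, if_pos hws]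
        exact this.1
      · rw [show buf ++ c :: cs = (buf ++ [c]) ++ cs by simp, pvF, if_pos hws]
        exact this.2
    · have hws' : PySem.Chars.isspace c = false := by simpa using hws
      by_cases hcd : c = d
      · subst hcd
        have hsp : pvSplit c (buf ++ c :: cs) = buf :: pvSplit c cs := by
          rw [pvSplit_append c buf _ (fun x hx => hne x (hb x hx))]
          simp [pvSplit]
        have hstrip : PySem.Chars.strip buf = [] := by
          rw [PySem.Chars.strip, show PySem.Chars.lstrip buf = [] from by
            simpa [PySem.Chars.lstrip] using pv_lstrip_ws_append buf [] hb]
          simp [PySem.Chars.rstrip]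
        have htail := (ih [] (by simp)).1
        simp only [List.nil_append] at htail
        obtain ⟨q, rest, hqr⟩ : ∃ q rest, pvSplit c cs = q :: rest := by
          cases h : pvSplit c cs with
          | nil => exact absurd h (pvSplit_ne_nil c cs)
          | cons q rest => exact ⟨q, rest, rfl⟩
        constructor
        · rw [hsp]
          simp only [List.map_cons, hstrip]
          rw [hqr] at htail
          simp only [List.map_cons] at htail
          rw [hqr, List.map_cons, PySem.Chars.join_cons_cons]
          simp only [List.nil_append]
          rw [pvF, if_neg (by simp [hws']), if_pos (by simp)]
          rw [← htail]
          simp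
        · have hQc : pvQ c (buf ++ c :: cs) =
              PySem.Chars.join [c] (PySem.Chars.rstrip buf :: (pvSplit c cs).map PySem.Chars.strip) := by
            rw [pvQ, hsp]
          rw [hQc, pv_rstrip_ws buf hb, hqr, List.map_cons, PySem.Chars.join_cons_cons]
          simp only [List.nil_append]
          rw [hqr] at htail
          simp only [List.map_cons] at htail
          rw [pvF, if_neg (by simp [hws']), if_pos (by simp)]
          rw [← htail]
          simp
      · obtain ⟨h, t, hqr⟩ : ∃ h t, pvSplit d cs = h :: t := by
          cases hh : pvSplit d cs with
          | nil => exact absurd hh (pvSplit_ne_nil d cs)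
          | cons q rest => exact ⟨q, rest, rfl⟩
        have hsp : pvSplit d (buf ++ c :: cs) = (buf ++ c :: h) :: t := by
          have : buf ++ c :: cs = (buf ++ [c]) ++ cs := by simp
          rw [this, pvSplit_append d (buf ++ [c]) cs (by
            intro x hx
            rcases List.mem_append.mp hx with h1 | h1
            · exact hne x (hb x h1)
            · simp at h1; subst h1; exact hcd), hqr]
          simp
        have ihK := (ih [] (by simp)).2
        simp only [List.nil_append] at ihK
        have hQ : pvQ d cs = PySem.Chars.join [d] (PySem.Chars.rstrip h :: t.map PySem.Chars.strip) := by
          rw [pvQ, hqr]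

        constructor
        · rw [hsp]
          simp only [List.map_cons]
          rw [pv_strip_ws_append_cons buf h c hb hws']
          rw [show (c :: PySem.Chars.rstrip h) = [c] ++ PySem.Chars.rstrip h from rfl]
          rw [pv_join_head]
          rw [← hQ, ihK]
          rw [pvF, if_neg (by simp [hws']), if_neg (by simp [hcd])]
          simp
        · have hQc : pvQ d (buf ++ c :: cs) =
              PySem.Chars.join [d] (PySem.Chars.rstrip (buf ++ c :: h) :: t.map PySem.Chars.strip) := by
            rw [pvQ, hsp]
          rw [hQc, pv_rstrip_append_cons buf h c hws']
          rw [show buf ++ c :: PySem.Chars.rstrip h = (buf ++ [c]) ++ PySem.Chars.rstrip h by simp]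
          rw [pv_join_head]
          rw [← hQ, ihK]
          rw [pvF, if_neg (by simp [hws']), if_neg (by simp [hcd])]
          simp

theorem pv_feed (p : Char → Bool) (chunk : List Char)
    (h : ∀ c ∈ chunk, PySem.Chars.isspace c = true) :
    ∀ m buf o, pvF p m buf (chunk ++ o) = pvF p m (buf ++ chunk) o := by
  induction chunk with
  | nil => simp
  | cons c cs ih =>
    intro m buf o
    rw [List.cons_append, pvF, if_pos (h c (by simp))]
    rw [ih (fun x hx => h x (by simp [hx])) m (buf ++ [c]) o]
    simp

theorem pv_comp (s : List Char) :
    (∀ (m2 : Bool) (buf : List Char), (∀ c ∈ buf, PySem.Chars.isspace c = true) →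
        pvF (· == ';') m2 [] (pvF (· == ')') true buf s) = pvF (fun c => c == ')' || c == ';') true buf s)
    ∧ (∀ buf : List Char, (∀ c ∈ buf, PySem.Chars.isspace c = true) →
        pvF (· == ';') true [] (pvF (· == ')') false buf s) = pvF (fun c => c == ')' || c == ';') true buf s)
    ∧ (∀ buf : List Char, (∀ c ∈ buf, PySem.Chars.isspace c = true) →
        pvF (· == ';') false [] (pvF (· == ')') false buf s) = pvF (fun c => c == ')' || c == ';') false buf s) := by
  induction s with
  | nil => refine ⟨fun m2 buf _ => ?_, fun buf _ => ?_, fun buf _ => ?_⟩ <;> simp [pvF]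
  | cons c cs ih =>
    obtain ⟨ihA, ihB, ihC⟩ := ih
    have hbc : ∀ (buf : List Char) c, (∀ x ∈ buf, PySem.Chars.isspace x = true) →
        PySem.Chars.isspace c = true → ∀ x ∈ buf ++ [c], PySem.Chars.isspace x = true := by
      intro buf c hb hc x hx
      rcases List.mem_append.mp hx with h1 | h1
      · exact hb x h1
      · simp at h1; subst h1; exact hc
    by_cases hws : PySem.Chars.isspace c = true
    · refine ⟨fun m2 buf hb => ?_, fun buf hb => ?_, fun buf hb => ?_⟩
      · rw [pvF_cons (· == ')'), if_pos hws, pvF_cons (fun c => c == ')' || c == ';'), if_pos hws]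
        exact ihA m2 (buf ++ [c]) (hbc buf c hb hws)
      · rw [pvF_cons (· == ')'), if_pos hws, pvF_cons (fun c => c == ')' || c == ';'), if_pos hws]
        exact ihB (buf ++ [c]) (hbc buf c hb hws)
      · rw [pvF_cons (· == ')'), if_pos hws, pvF_cons (fun c => c == ')' || c == ';'), if_pos hws]
        exact ihC (buf ++ [c]) (hbc buf c hb hws)
    · have hws' : PySem.Chars.isspace c = false := by simpa using hws
      by_cases hp : c = ')'
      · subst hp
        have h1 : PySem.Chars.isspace ')' = false := by decide
        refine ⟨fun m2 buf hb => ?_, fun buf hb => ?_, fun buf hb => ?_⟩ <;>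
          simp [pvF_cons, h1, ihA false [] (by simp), ihA true [] (by simp),
            ihB [] (by simp), ihC [] (by simp), pv_feed _ buf hb]
      · by_cases hsc : c = ';'
        · subst hsc
          have h1 : PySem.Chars.isspace ';' = false := by decide
          refine ⟨fun m2 buf hb => ?_, fun buf hb => ?_, fun buf hb => ?_⟩ <;>
            simp [pvF_cons, h1, ihA false [] (by simp), ihA true [] (by simp),
              ihB [] (by simp), ihC [] (by simp), pv_feed _ buf hb]
        · have hp' : (c == ')') = false := by simp [hp]
          have hsc' : (c == ';') = false := by simp [hsc]
          refine ⟨fun m2 buf hb => ?_, fun buf hb => ?_, fun buf hb => ?_⟩ <;>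
            simp [pvF_cons, hws', hp', hsc', ihA false [] (by simp), ihA true [] (by simp),
              ihB [] (by simp), ihC [] (by simp), pv_feed _ buf hb]

theorem pv_fold_eq (s : List Char) : ∀ (out buf : List Char) (b : Bool),
    (s.foldl
      (fun st c =>
        if PySem.Chars.isspace c then (st.1, st.2.1 ++ [c], st.2.2)
        else ((if st.2.2 || st.1.isEmpty || (c == ')' || c == ';') then st.1 else st.1 ++ st.2.1) ++ [c], [],
          c == ')' || c == ';'))
      (out, buf, b)).1 = out ++ pvF (fun c => c == ')' || c == ';') (b || out.isEmpty) buf s := by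
  induction s with
  | nil => intro out buf b; simp [pvF]
  | cons c cs ih =>
    intro out buf b
    rw [List.foldl_cons]
    by_cases hws : PySem.Chars.isspace c = true
    · rw [if_pos hws, ih out (buf ++ [c]) b, pvF_cons, if_pos hws]
    · have hws' : PySem.Chars.isspace c = false := by simpa using hws
      simp only [hws', Bool.false_eq_true, if_false, pvF_cons]
      by_cases hd : (c == ')' || c == ';') = true
      · simp only [hd, Bool.or_true, reduceIte]
        rw [ih (out ++ [c]) [] true]
        simp
      · have hd' : (c == ')' || c == ';') = false := by simpa using hd
        simp only [hd', Bool.or_false, Bool.false_eq_true, if_false]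
        by_cases hm : (b || out.isEmpty) = true
        · simp only [hm, reduceIte]
          rw [ih (out ++ [c]) [] false]
          have he : (out ++ [c]).isEmpty = false := by simp
          simp [he]
        · have hm' : (b || out.isEmpty) = false := by simpa using hm
          simp only [hm', Bool.false_eq_true, if_false]
          rw [ih (out ++ buf ++ [c]) [] false]
          have he : (out ++ (buf ++ [c])).isEmpty = false := by simp
          simp [he]

-- ===== VERDICT (by name: the statement is the Claim_ definition above) =====
theorem undepulicate_label_spec : Claim_equal_undepulicate_label := by
  intro label _
  simp only [Spec_undepulicate_label, undepulicate_label, undepulicate_label_alt]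
  have hA1 := (pv_onepass ')' (by decide) label.toList [] (by simp)).1
  rw [List.nil_append] at hA1
  rw [pv_splitOn_eq ')' label.toList, hA1]
  have hA2 := (pv_onepass ';' (by decide) (pvF (· == ')') true [] label.toList) [] (by simp)).1
  rw [List.nil_append] at hA2
  rw [pv_splitOn_eq ';' _, hA2]
  rw [(pv_comp label.toList).1 true [] (by simp)]
  rw [pv_fold_eq label.toList [] [] false]
  simp
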